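-- pv_equiv track=rewrite | github.com/amolkulkar/final-roborta-keyboard | src/keyboard_hook.py | _mask_by_spans
-- ===== SOURCE A (Python) =====
-- from typing import List, Tuple, Dict
--
-- Span = Tuple[int, int, str, str]  # (start, end, term, kind)
--
-- def _merge_spans(spans: List[Span]) -> List[Span]:
--     if not spans:
--         return []
--     spans = sorted(spans, key=lambda x: (x[0], x[1]))
--     merged: List[Span] = []
--     for st, ed, term, kind in spans:
--         if not merged:
--             merged.append((st, ed, term, kind))
--             continue
--         pst, ped, pterm, pkind = merged[-1]
--         if st <= ped:
--             merged[-1] = (pst, max(ped, ed), pterm, pkind if pkind != "ml" else kind)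
--         else:
--             merged.append((st, ed, term, kind))
--     return merged
--
-- def _mask_by_spans(raw: str, spans: List[Span], ch: str = "*") -> str:
--     spans = _merge_spans(spans)
--     if not spans:
--         return raw
--     chars = list(raw)
--     for s, e, *_ in spans:
--         s = max(0, min(s, len(chars)))
--         e = max(s, min(e, len(chars)))
--         for i in range(s, e):
--             chars[i] = ch
--     return "".join(chars)
-- ===== SOURCE B (Python) =====
-- from typing import List, Tuple
--
-- Span = Tuple[int, int, str, str]  # (start, end, term, kind)
--
-- def _mask_by_spans(raw: str, spans: List[Span], ch: str = "*") -> str: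
--     # Difference array over the span endpoints: no sorting, no merging, one sweep.
--     n = len(raw)
--     delta = [0] * (n + 1)
--     for s, e, _term, _kind in spans:
--         s = max(0, min(s, n))
--         e = max(s, min(e, n))
--         delta[s] += 1
--         delta[e] -= 1
--     out = []
--     cover = 0
--     for i, c in enumerate(raw):
--         cover += delta[i]
--         out.append(ch if cover > 0 else c)
--     return "".join(out)
-- ===== Notes on version B (the rewrite author's own statement) =====
-- stated objective: alternative
-- what changed: B drops the sort-and-merge preprocessing and the per-span in-place range writes, and instead accumulates each clamped span into a difference array (delta[s]+=1, delta[e]-=1) and builds the output in a single running-count sweep, masking index i exactly when the count is positive.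
import Mathlib
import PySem

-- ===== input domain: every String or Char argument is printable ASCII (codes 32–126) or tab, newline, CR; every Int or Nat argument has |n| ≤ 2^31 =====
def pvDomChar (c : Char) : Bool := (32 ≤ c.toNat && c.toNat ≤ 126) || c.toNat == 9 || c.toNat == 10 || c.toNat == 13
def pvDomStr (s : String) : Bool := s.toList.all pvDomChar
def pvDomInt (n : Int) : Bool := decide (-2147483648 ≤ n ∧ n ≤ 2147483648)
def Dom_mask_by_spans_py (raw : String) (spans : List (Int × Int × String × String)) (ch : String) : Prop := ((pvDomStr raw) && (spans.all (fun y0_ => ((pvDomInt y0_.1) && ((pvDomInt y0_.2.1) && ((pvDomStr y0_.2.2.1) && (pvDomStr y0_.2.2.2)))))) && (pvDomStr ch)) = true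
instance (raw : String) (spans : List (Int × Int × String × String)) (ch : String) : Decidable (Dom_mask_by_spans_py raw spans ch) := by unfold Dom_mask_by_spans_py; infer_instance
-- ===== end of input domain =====

-- B replaces A's sort-merge-and-mutate masking by a difference array over the clamped span
-- endpoints plus one running-count sweep (the merge is output-irrelevant); objective: alternative.

-- ===== PORT A =====
-- one iteration of _merge_spans' loop; the accumulator is the merged list REVERSED
-- (its head is Python's merged[-1], so 'merged[-1] = …' is replacing the head)
def pvMergeStep (acc : List (Int × Int × String × String)) (sp : Int × Int × String × String) : List (Int × Int × String × String) :=
  match acc with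
  | [] => [sp]
  | (pst, ped, pterm, pkind) :: rest =>
      if sp.1 ≤ ped then
        (pst, max ped sp.2.1, pterm, if pkind ≠ "ml" then pkind else sp.2.2.2) :: rest
      else sp :: (pst, ped, pterm, pkind) :: rest

def merge_spans_py (spans : List (Int × Int × String × String)) : List (Int × Int × String × String) :=
  if spans = [] then []
  else ((PySem.List.sorted2 spans (fun x => x.1) (fun x => x.2.1)).foldl pvMergeStep []).reverse

-- the body of A's 'for s, e, *_ in spans' loop: clamp s and e, then 'for i in range(s, e): chars[i] = ch'
def pvMaskSpan (ch : String) (cs : List String) (sp : Int × Int × String × String) : List String :=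
  let s := max 0 (min sp.1 (cs.length : Int))
  let e := max s (min sp.2.1 (cs.length : Int))
  (PySem.List.pyRange s e 1).foldl (fun cs2 i => cs2.set i.toNat ch) cs

def mask_by_spans_py (raw : String) (spans : List (Int × Int × String × String)) (ch : String) : String :=
  let spans2 := merge_spans_py spans
  if spans2 = [] then raw
  else String.join (spans2.foldl (pvMaskSpan ch) (raw.toList.map (fun c => String.ofList [c])))

-- ===== PORT B =====
-- B-side helpers: one "delta[s] += 1; delta[e] -= 1" update, and one step of the sweep loop
def pvDeltaStep (n : Int) (d : List Int) (sp : Int × Int × String × String) : List Int :=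
  let s := max 0 (min sp.1 n)
  let e := max s (min sp.2.1 n)
  let d1 := d.set s.toNat (d.getD s.toNat 0 + 1)
  d1.set e.toNat (d1.getD e.toNat 0 - 1)

def pvSweepStep (delta : List Int) (ch : String) (acc : List String × Int) (p : Int × Char) : List String × Int :=
  let cover := acc.2 + delta.getD p.1.toNat 0
  (acc.1 ++ [if cover > 0 then ch else String.ofList [p.2]], cover)

def mask_by_spans_py_alt (raw : String) (spans : List (Int × Int × String × String)) (ch : String) : String :=
  let n : Int := (raw.toList.length : Int)
  let delta := spans.foldl (pvDeltaStep n) (List.replicate (n.toNat + 1) 0)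
  String.join (((PySem.List.enumerate raw.toList 0).foldl (pvSweepStep delta ch) ([], 0)).1)

-- ===== PRECONDITION & SPEC =====
def Spec_mask_by_spans_py (raw : String) (spans : List (Int × Int × String × String)) (ch : String) (out : String) : Prop := out = mask_by_spans_py_alt raw spans ch
instance (raw : String) (spans : List (Int × Int × String × String)) (ch : String) (out : String) : Decidable (Spec_mask_by_spans_py raw spans ch out) := by unfold Spec_mask_by_spans_py; infer_instance

-- ===== CLAIM (what is proved, stated in full; the proofs are below) =====
def Claim_equal_mask_by_spans_py : Prop := ∀ (raw : String) (spans : List (Int × Int × String × String)) (ch : String), Dom_mask_by_spans_py raw spans ch → Spec_mask_by_spans_py raw spans ch (mask_by_spans_py raw spans ch)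

-- ===== LEMMAS AND PROOFS =====

-- index i is covered by some span of L (raw, unclamped endpoints)
def pvCov (L : List (Int × Int × String × String)) (i : Int) : Bool :=
  L.any (fun sp => decide (sp.1 ≤ i ∧ i < sp.2.1))

theorem pvCov_cons (sp : Int × Int × String × String) (L : List (Int × Int × String × String)) (i : Int) :
    (pvCov (sp :: L) i = true) ↔ ((sp.1 ≤ i ∧ i < sp.2.1) ∨ pvCov L i = true) := by
  simp [pvCov]

theorem pvCov_perm {L M : List (Int × Int × String × String)} (h : L.Perm M) (i : Int) :
    pvCov L i = pvCov M i :=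
  List.Perm.any_eq h

-- the inner 'for i in range(s, e): chars[i] = ch' loop, element by element
theorem pvSetRange_getElem?_aux (ch : String) :
    ∀ (n : Nat) (s e : Int) (cs : List String) (k : Nat), 0 ≤ s → (e - s).toNat = n →
    ((PySem.List.pyRange s e 1).foldl (fun cs2 i => cs2.set i.toNat ch) cs)[k]? =
      if s ≤ (k : Int) ∧ (k : Int) < e then (if k < cs.length then some ch else none) else cs[k]? := by
  intro n
  induction n with
  | zero =>
      intro s e cs k hs hn
      rw [PySem.List.pyRange_one_eq_nil (by omega)]
      simp only [List.foldl_nil]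
      rw [if_neg (by omega)]
  | succ m ih =>
      intro s e cs k hs hn
      rw [PySem.List.pyRange_one_cons (by omega)]
      simp only [List.foldl_cons]
      rw [ih (s + 1) e (cs.set s.toNat ch) k (by omega) (by omega)]
      simp only [List.length_set, List.getElem?_set]
      have hst : (s.toNat : Int) = s := Int.toNat_of_nonneg hs
      by_cases h1 : s + 1 ≤ (k : Int) ∧ (k : Int) < e
      · rw [if_pos h1, if_pos (show s ≤ (k : Int) ∧ (k : Int) < e by omega)]
      · rw [if_neg h1]
        by_cases h2 : s ≤ (k : Int) ∧ (k : Int) < e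
        · have hks : s.toNat = k := by omega
          rw [if_pos h2, if_pos hks, hks]
        · rw [if_neg h2, if_neg (show ¬ s.toNat = k by omega)]

theorem pvSetRange_getElem? (ch : String) (s e : Int) (cs : List String) (k : Nat) (hs : 0 ≤ s) :
    ((PySem.List.pyRange s e 1).foldl (fun cs2 i => cs2.set i.toNat ch) cs)[k]? =
      if s ≤ (k : Int) ∧ (k : Int) < e then (if k < cs.length then some ch else none) else cs[k]? :=
  pvSetRange_getElem?_aux ch (e - s).toNat s e cs k hs rfl

theorem pvSetFold_length (ch : String) :
    ∀ (l : List Int) (cs : List String),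
    (l.foldl (fun cs2 i => cs2.set i.toNat ch) cs).length = cs.length := by
  intro l
  induction l with
  | nil => intro cs; rfl
  | cons x t ih => intro cs; simpa using ih (cs.set x.toNat ch)

theorem pvMaskSpan_length (ch : String) (cs : List String) (sp : Int × Int × String × String) :
    (pvMaskSpan ch cs sp).length = cs.length := by
  simp only [pvMaskSpan]
  exact pvSetFold_length ch _ cs

theorem pvMaskSpan_getElem? (ch : String) (cs : List String) (sp : Int × Int × String × String)
    (k : Nat) (hk : k < cs.length) :
    (pvMaskSpan ch cs sp)[k]? = if sp.1 ≤ (k : Int) ∧ (k : Int) < sp.2.1 then some ch else cs[k]? := by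
  simp only [pvMaskSpan]
  rw [pvSetRange_getElem? ch _ _ cs k (by omega)]
  by_cases h : sp.1 ≤ (k : Int) ∧ (k : Int) < sp.2.1
  · rw [if_pos (by omega), if_pos hk, if_pos h]
  · rw [if_neg (by omega), if_neg h]

-- the outer span loop: position k ends up masked iff some span of L covers it
theorem pvFoldMask_getElem? (ch : String) :
    ∀ (L : List (Int × Int × String × String)) (cs : List String) (k : Nat), k < cs.length →
    (L.foldl (pvMaskSpan ch) cs)[k]? = if pvCov L (k : Int) then some ch else cs[k]? := by
  intro L
  induction L with
  | nil => intro cs k hk; simp [pvCov]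
  | cons sp t ih =>
      intro cs k hk
      simp only [List.foldl_cons]
      rw [ih (pvMaskSpan ch cs sp) k (by rw [pvMaskSpan_length]; exact hk),
          pvMaskSpan_getElem? ch cs sp k hk]
      by_cases h1 : pvCov t (k : Int) = true
      · rw [if_pos h1, if_pos ((pvCov_cons sp t k).mpr (Or.inr h1))]
      · rw [if_neg h1]
        by_cases h2 : sp.1 ≤ (k : Int) ∧ (k : Int) < sp.2.1
        · rw [if_pos h2, if_pos ((pvCov_cons sp t k).mpr (Or.inl h2))]
        · rw [if_neg h2, if_neg (by rw [pvCov_cons]; tauto)]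

theorem pvFoldMask_length (ch : String) (L : List (Int × Int × String × String)) (cs : List String) :
    (L.foldl (pvMaskSpan ch) cs).length = cs.length := by
  induction L generalizing cs with
  | nil => rfl
  | cons sp t ih => rw [List.foldl_cons, ih, pvMaskSpan_length]

-- insertion sort keeps a Pairwise property that the comparison implies in both directions
theorem pvInsertBy_pairwise {α : Type} (r : α → α → Prop) (before : α → α → Bool)
    (htrans : ∀ a b c, r a b → r b c → r a c)
    (h1 : ∀ a b, before a b = true → r a b) (h2 : ∀ a b, before a b = false → r b a)
    (x : α) : ∀ (ys : List α), ys.Pairwise r → (PySem.List.insertBy before x ys).Pairwise r := by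
  intro ys
  induction ys with
  | nil => intro _; simp [PySem.List.insertBy]
  | cons y t ih =>
      intro hp
      rw [List.pairwise_cons] at hp
      unfold PySem.List.insertBy
      by_cases hb : before x y = true
      · rw [if_pos hb]
        refine List.pairwise_cons.mpr ⟨?_, List.pairwise_cons.mpr ⟨hp.1, hp.2⟩⟩
        intro z hz
        rcases List.mem_cons.mp hz with h | h
        · exact h ▸ h1 x y hb
        · exact htrans x y z (h1 x y hb) (hp.1 z h)
      · rw [if_neg hb]
        refine List.pairwise_cons.mpr ⟨?_, ih hp.2⟩
        intro z hz
        rcases (PySem.List.mem_insertBy before x z t).mp hz with h | h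
        · exact h ▸ h2 x y (by simpa using hb)
        · exact hp.1 z h

theorem pvFoldInsert_pairwise {α : Type} (r : α → α → Prop) (before : α → α → Bool)
    (htrans : ∀ a b c, r a b → r b c → r a c)
    (h1 : ∀ a b, before a b = true → r a b) (h2 : ∀ a b, before a b = false → r b a)
    (xs : List α) : ∀ (acc : List α), acc.Pairwise r →
    (xs.foldl (fun a x => PySem.List.insertBy before x a) acc).Pairwise r := by
  induction xs with
  | nil => intro acc h; exact h
  | cons x t ih =>
      intro acc h
      exact ih _ (pvInsertBy_pairwise r before htrans h1 h2 x acc h)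

-- the sorted list's start positions are nondecreasing
theorem pvSorted2_pairwise_fst (spans : List (Int × Int × String × String)) :
    (PySem.List.sorted2 spans (fun x => x.1) (fun x => x.2.1)).Pairwise
      (fun a b => a.1 ≤ b.1) := by
  unfold PySem.List.sorted2
  simp only [if_neg (by simp : ¬ (false = true))]
  refine pvFoldInsert_pairwise (fun a b => a.1 ≤ b.1)
    (fun a b => decide (a.1 < b.1) || !decide (b.1 < a.1) && decide (a.2.1 < b.2.1))
    ?_ ?_ ?_ spans [] List.Pairwise.nil
  · intro a b c hab hbc; omega
  · intro a b h
    simp only [Bool.or_eq_true, Bool.and_eq_true, decide_eq_true_iff, Bool.not_eq_eq_eq_not,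
      Bool.not_true, decide_eq_false_iff_not] at h
    rcases h with h | ⟨h, _⟩ <;> omega
  · intro a b h
    simp only [Bool.or_eq_false_iff, Bool.and_eq_false_iff, decide_eq_false_iff_not,
      Bool.not_eq_eq_eq_not, Bool.not_false, decide_eq_true_iff] at h
    rcases h with ⟨h1, h | h⟩ <;> omega

-- one pvMergeStep neither loses nor gains coverage (head start ≤ incoming start)
theorem pvMergeStep_covered (acc : List (Int × Int × String × String))
    (sp : Int × Int × String × String)
    (hhd : ∀ pst ped pt pk rest, acc = (pst, ped, pt, pk) :: rest → pst ≤ sp.1) (i : Int) :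
    (pvCov (pvMergeStep acc sp) i = true) ↔ (pvCov acc i = true ∨ (sp.1 ≤ i ∧ i < sp.2.1)) := by
  match acc with
  | [] => simp [pvMergeStep, pvCov]
  | (pst, ped, pterm, pkind) :: rest =>
      have hp : pst ≤ sp.1 := hhd pst ped pterm pkind rest rfl
      simp only [pvMergeStep]
      by_cases hb : sp.1 ≤ ped
      · rw [if_pos hb]
        simp only [pvCov_cons]
        constructor
        · rintro (⟨ha, hb2⟩ | hR)
          · by_cases hi : i < ped
            · exact Or.inl (Or.inl ⟨ha, hi⟩)
            · exact Or.inr ⟨by omega, by omega⟩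
          · exact Or.inl (Or.inr hR)
        · rintro ((⟨ha, hb2⟩ | hR) | ⟨ha, hb2⟩)
          · exact Or.inl ⟨ha, by omega⟩
          · exact Or.inr hR
          · exact Or.inl ⟨by omega, by omega⟩
      · rw [if_neg hb]
        simp only [pvCov_cons]
        tauto

theorem pvMergeFold_covered :
    ∀ (L acc : List (Int × Int × String × String)),
    L.Pairwise (fun a b => a.1 ≤ b.1) →
    (∀ sp' ∈ L, ∀ pst ped pt pk rest, acc = (pst, ped, pt, pk) :: rest → pst ≤ sp'.1) →
    ∀ i : Int, (pvCov (L.foldl pvMergeStep acc) i = true) ↔ (pvCov acc i = true ∨ pvCov L i = true) := by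
  intro L
  induction L with
  | nil => intro acc _ _ i; simp [pvCov]
  | cons sp t ih =>
      intro acc hp hhd i
      rw [List.pairwise_cons] at hp
      simp only [List.foldl_cons]
      have hstep := pvMergeStep_covered acc sp
        (fun pst ped pt pk rest h => hhd sp (by simp) pst ped pt pk rest h)
      have hhd' : ∀ sp' ∈ t, ∀ pst' ped' pt' pk' rest',
          pvMergeStep acc sp = (pst', ped', pt', pk') :: rest' → pst' ≤ sp'.1 := by
        intro sp' hsp' pst' ped' pt' pk' rest' heq
        match acc with
        | [] =>
            simp only [pvMergeStep, List.cons.injEq] at heq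
            have : sp.1 = pst' := by rw [heq.1]
            rw [← this]
            exact hp.1 sp' hsp'
        | (pst, ped, pterm, pkind) :: rest =>
            have hpst : pst ≤ sp.1 := hhd sp (by simp) pst ped pterm pkind rest rfl
            simp only [pvMergeStep] at heq
            by_cases hb : sp.1 ≤ ped
            · rw [if_pos hb] at heq
              simp only [List.cons.injEq, Prod.mk.injEq] at heq
              have : pst = pst' := heq.1.1
              rw [← this]
              exact le_trans hpst (hp.1 sp' hsp')
            · rw [if_neg hb] at heq
              simp only [List.cons.injEq] at heq
              have : sp.1 = pst' := by rw [heq.1]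
              rw [← this]
              exact hp.1 sp' hsp'
      rw [ih (pvMergeStep acc sp) hp.2 hhd' i, hstep i, pvCov_cons]
      tauto

theorem pvMerge_covered (spans : List (Int × Int × String × String)) (i : Int) :
    pvCov (merge_spans_py spans) i = pvCov spans i := by
  unfold merge_spans_py
  by_cases h : spans = []
  · rw [if_pos h, h]
  · rw [if_neg h]
    rw [Bool.eq_iff_iff]
    rw [show pvCov (((PySem.List.sorted2 spans (fun x => x.1) (fun x => x.2.1)).foldl pvMergeStep []).reverse) i = pvCov ((PySem.List.sorted2 spans (fun x => x.1) (fun x => x.2.1)).foldl pvMergeStep []) i from pvCov_perm (List.reverse_perm _) i]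
    rw [pvMergeFold_covered _ [] (pvSorted2_pairwise_fst spans) (by intro _ _ _ _ _ _ _ h; simp at h) i]
    rw [show pvCov (PySem.List.sorted2 spans (fun x => x.1) (fun x => x.2.1)) i = pvCov spans i from pvCov_perm (PySem.List.sorted2_perm spans _ _ false) i]
    simp [pvCov]

theorem pvMergeStep_ne_nil (acc : List (Int × Int × String × String))
    (sp : Int × Int × String × String) : pvMergeStep acc sp ≠ [] := by
  match acc with
  | [] => simp [pvMergeStep]
  | (pst, ped, pterm, pkind) :: rest =>
      simp only [pvMergeStep]
      by_cases hb : sp.1 ≤ ped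
      · rw [if_pos hb]; simp
      · rw [if_neg hb]; simp

theorem pvMergeFold_ne_nil :
    ∀ (L acc : List (Int × Int × String × String)), acc ≠ [] →
    L.foldl pvMergeStep acc ≠ [] := by
  intro L
  induction L with
  | nil => intro acc h; exact h
  | cons sp t ih => intro acc _; exact ih _ (pvMergeStep_ne_nil acc sp)

theorem pvMerge_eq_nil_iff (spans : List (Int × Int × String × String)) :
    merge_spans_py spans = [] ↔ spans = [] := by
  unfold merge_spans_py
  by_cases h : spans = []
  · rw [if_pos h]; simp [h]
  · rw [if_neg h]
    simp only [List.reverse_eq_nil_iff]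
    constructor
    · intro hc
      exfalso
      match hs : PySem.List.sorted2 spans (fun x => x.1) (fun x => x.2.1) with
      | [] =>
          have hperm := PySem.List.sorted2_perm spans (fun x => x.1) (fun x => x.2.1) false
          rw [hs] at hperm
          exact h (List.Perm.eq_nil hperm.symm)
      | sp :: t =>
          rw [hs, List.foldl_cons] at hc
          exact pvMergeFold_ne_nil t _ (pvMergeStep_ne_nil [] sp) hc
    · intro hc; exact absurd hc h

theorem pvJoin_singletons (l : List Char) (s : String) :
    ((l.map fun c => String.ofList [c]).foldl (· ++ ·) s) = s ++ String.ofList l := by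
  induction l generalizing s with
  | nil => simp
  | cons c t ih =>
      simp only [List.map_cons, List.foldl_cons, ih]
      apply String.toList_inj.mp; simp

-- B-side: prefix sums of the difference array count the covering spans
theorem pvTakeSucc_sum (d : List Int) : ∀ (s : Nat), (d.take (s + 1)).sum = (d.take s).sum + d.getD s 0 := by
  induction d with
  | nil => intro s; simp
  | cons a t ih =>
      intro s
      cases s with
      | zero => simp
      | succ m =>
          simp only [List.take_succ_cons, List.sum_cons, ih m, List.getD_cons_succ]
          ring

theorem pvSetTake_sum (d : List Int) : ∀ (j m : Nat) (v : Int),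
    ((d.set j v).take m).sum = (d.take m).sum + (if j < m ∧ j < d.length then v - d.getD j 0 else 0) := by
  induction d with
  | nil => intro j m v; simp
  | cons a t ih =>
      intro j m v
      cases j with
      | zero =>
          cases m with
          | zero => simp
          | succ m' =>
              simp only [List.set_cons_zero, List.take_succ_cons, List.sum_cons, List.length_cons,
                List.getD_cons_zero]
              rw [if_pos (by omega)]
              ring
      | succ j' =>
          cases m with
          | zero => simp
          | succ m' =>
              simp only [List.set_cons_succ, List.take_succ_cons, List.sum_cons, ih j' m' v,
                List.getD_cons_succ, List.length_cons]
              by_cases h : j' < m' ∧ j' < t.length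
              · rw [if_pos h, if_pos (by omega)]; ring
              · rw [if_neg h, if_neg (by omega)]; ring

theorem pvDeltaStep_length (n : Int) (d : List Int) (sp : Int × Int × String × String) :
    (pvDeltaStep n d sp).length = d.length := by
  simp [pvDeltaStep]

theorem pvDeltaStep_prefix (len : Nat) (d : List Int) (hd : d.length = len + 1)
    (sp : Int × Int × String × String) (k : Nat) (hk : k < len) :
    ((pvDeltaStep (len : Int) d sp).take (k + 1)).sum =
      (d.take (k + 1)).sum + (if sp.1 ≤ (k : Int) ∧ (k : Int) < sp.2.1 then 1 else 0) := by
  simp only [pvDeltaStep]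
  rw [pvSetTake_sum, pvSetTake_sum]
  simp only [List.length_set]
  split_ifs <;> omega

theorem pvDeltaFold_prefix (len : Nat) :
    ∀ (L : List (Int × Int × String × String)) (d : List Int), d.length = len + 1 →
    ∀ (k : Nat), k < len →
    ((L.foldl (pvDeltaStep (len : Int)) d).take (k + 1)).sum =
      (d.take (k + 1)).sum + ((L.countP (fun sp => decide (sp.1 ≤ (k : Int) ∧ (k : Int) < sp.2.1)) : Nat) : Int) := by
  intro L
  induction L with
  | nil => intro d _ k _; simp
  | cons sp t ih =>
      intro d hd k hk
      rw [List.foldl_cons, ih (pvDeltaStep (len : Int) d sp) (by rw [pvDeltaStep_length]; exact hd) k hk,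
        pvDeltaStep_prefix len d hd sp k hk, List.countP_cons]
      by_cases h : sp.1 ≤ (k : Int) ∧ (k : Int) < sp.2.1
      · rw [if_pos h]
        simp only [h, and_self, decide_true, if_pos]
        push_cast; ring
      · rw [if_neg h]
        have : decide (sp.1 ≤ (k : Int) ∧ (k : Int) < sp.2.1) = false := by
          simpa using h
        simp only [this]
        rw [if_neg (by simp)]
        push_cast; ring

-- the sweep loop: the running count at index i is the prefix sum of delta up to i
theorem pvSweep (delta : List Int) (ch : String) :
    ∀ (l : List Char) (s : Nat) (out : List String),
    ((PySem.List.enumerate l ((s : Nat) : Int)).foldl (pvSweepStep delta ch) (out, (delta.take s).sum)).1 =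
      out ++ (PySem.List.enumerate l ((s : Nat) : Int)).map
        (fun p => if (delta.take (p.1.toNat + 1)).sum > 0 then ch else String.ofList [p.2]) := by
  intro l
  induction l with
  | nil => intro s out; simp [PySem.List.enumerate]
  | cons c t ih =>
      intro s out
      rw [PySem.List.enumerate_cons]
      simp only [List.foldl_cons, List.map_cons]
      have hcast : ((s : Nat) : Int) + 1 = (((s + 1 : Nat)) : Int) := by push_cast; ring
      have hstep : pvSweepStep delta ch (out, (delta.take s).sum) (((s : Nat) : Int), c) =
          (out ++ [if (delta.take (s + 1)).sum > 0 then ch else String.ofList [c]],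
            (delta.take (s + 1)).sum) := by
        simp only [pvSweepStep, Int.toNat_natCast]
        rw [pvTakeSucc_sum]
      rw [hstep, hcast, ih (s + 1) _]
      simp [Int.toNat_natCast, List.append_assoc]

-- B's whole loop produces exactly the per-index masking decision
theorem pvAltList (raw : String) (spans : List (Int × Int × String × String)) (ch : String) :
    (((PySem.List.enumerate raw.toList 0).foldl
        (pvSweepStep (spans.foldl (pvDeltaStep (raw.toList.length : Int))
          (List.replicate (raw.toList.length + 1) 0)) ch) ([], 0)).1) =
      (PySem.List.enumerate raw.toList 0).map (fun p =>
        if spans.any (fun sp => decide (sp.1 ≤ p.1 ∧ p.1 < sp.2.1)) then ch else String.ofList [p.2]) := by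
  have h := pvSweep (spans.foldl (pvDeltaStep (raw.toList.length : Int))
      (List.replicate (raw.toList.length + 1) 0)) ch raw.toList 0 []
  simp only [Nat.cast_zero, List.take_zero, List.sum_nil, List.nil_append] at h
  rw [h]
  apply List.map_congr_left
  intro p hp
  obtain ⟨k, hk, hpk⟩ := (PySem.List.mem_enumerate_iff raw.toList 0 p).mp hp
  subst hpk
  simp only [zero_add, Int.toNat_natCast]
  refine if_congr ?_ rfl rfl
  rw [pvDeltaFold_prefix raw.toList.length spans _ (by simp) k hk]
  have hrep : ((List.replicate (raw.toList.length + 1) (0 : Int)).take (k + 1)).sum = 0 := by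
    rw [List.take_replicate]
    simp
  rw [hrep, zero_add]
  rw [show (((spans.countP (fun sp => decide (sp.1 ≤ (k : Int) ∧ (k : Int) < sp.2.1)) : Nat) : Int) > 0) ↔
      0 < spans.countP (fun sp => decide (sp.1 ≤ (k : Int) ∧ (k : Int) < sp.2.1)) from by omega]
  rw [List.countP_pos_iff, List.any_eq_true]

-- B's list, entry by entry
theorem pvAlt_getElem? (raw : String) (spans : List (Int × Int × String × String)) (ch : String)
    (k : Nat) :
    ((PySem.List.enumerate raw.toList 0).map (fun p =>
      if spans.any (fun sp => decide (sp.1 ≤ p.1 ∧ p.1 < sp.2.1)) then ch else String.ofList [p.2]))[k]? =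
    (raw.toList[k]?.map (fun c => if pvCov spans (k : Int) then ch else String.ofList [c])) := by
  rw [List.getElem?_map, PySem.List.getElem?_enumerate]
  rcases h : raw.toList[k]? with _ | c
  · simp
  · simp only [Option.map_some]
    congr 1
    show (if pvCov spans ((0 : Int) + (k : Nat)) then ch else String.ofList [c]) = _
    rw [show ((0 : Int) + (k : Nat)) = ((k : Nat) : Int) from by omega]

theorem pvJoin_eq_foldl (l : List String) : String.join l = l.foldl (· ++ ·) "" := rfl

-- ===== VERDICT (by name: the statement is the Claim_ definition above) =====
theorem mask_by_spans_py_spec : Claim_equal_mask_by_spans_py := by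
  intro raw spans ch _
  unfold Spec_mask_by_spans_py mask_by_spans_py mask_by_spans_py_alt
  simp only [Int.toNat_natCast]
  rw [pvAltList raw spans ch]
  by_cases hnil : merge_spans_py spans = []
  · have hsp : spans = [] := (pvMerge_eq_nil_iff spans).mp hnil
    rw [if_pos hnil]
    subst hsp
    have hmap : ((PySem.List.enumerate raw.toList 0).map (fun p =>
        if ([] : List (Int × Int × String × String)).any (fun sp => decide (sp.1 ≤ p.1 ∧ p.1 < sp.2.1)) then ch else String.ofList [p.2])) =
        raw.toList.map (fun c => String.ofList [c]) := by
      apply List.ext_getElem?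
      intro k
      rw [pvAlt_getElem?, List.getElem?_map]
      rcases h : raw.toList[k]? with _ | c
      · simp
      · simp [pvCov]
    rw [hmap, pvJoin_eq_foldl, pvJoin_singletons]
    apply String.toList_inj.mp
    simp
  · rw [if_neg hnil]
    apply congrArg String.join
    apply List.ext_getElem?
    intro k
    rw [pvAlt_getElem?]
    by_cases hk : k < raw.toList.length
    · rw [pvFoldMask_getElem? ch _ _ k (by simpa using hk), pvMerge_covered, List.getElem?_map]
      obtain ⟨c, hc⟩ : ∃ c, raw.toList[k]? = some c := ⟨raw.toList[k]'hk, List.getElem?_eq_some_iff.mpr ⟨hk, rfl⟩⟩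
      rw [hc]
      simp only [Option.map_some]
      by_cases hcov : pvCov spans (k : Int) = true <;> simp [hcov]
    · rw [List.getElem?_eq_none (by rw [pvFoldMask_length]; simpa using hk),
          List.getElem?_eq_none (by simpa using hk)]
      simp
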